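-- pv_equiv track=rewrite | github.com/kumar-aruna/Genomic_Code_Exercises | Module-01/Assembly.py | findMaxOverlap
-- ===== SOURCE A (Python) =====
-- def findMaxOverlap(contig, reads, k):
--     """
--     Find the read with the maximum overlap with the contig.
--     :param contig: The current contig sequence being built using reads.
--     :param reads: A list of remaining reads to check for maximum overlap.
--     :param k: Minimum length of overlap to consider and generate contigs.
--     :return: The read with the maximum overlap and the length of that overlap happened.
--     """
--     max_overlap = 0  # Initialize the maximum overlap length as Zero
--     max_read = None  # Initialize the read with the maximum overlap
--
--     # Iterate through each read in the list
--     for read in reads: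
--         # Find the maximum possible overlap
--         overlap = max(len(contig), len(read))
--
--         # Check for overlap from k to maximum possible overlap to make a contig
--         for i in range(k, overlap):
--             # Check if the current contig ends or starts with a substring of the read
--             if contig.endswith(read[:i]) or contig.startswith(read[-i:]):
--                 # Update max_overlap and max_read if a larger overlap is found
--                 if i > max_overlap:
--                     max_overlap, max_read = i, read
--
--     return max_read, max_overlap
-- ===== SOURCE B (Python) =====
-- def findMaxOverlap(contig, reads, k):
--     """Same result as A by a different search: instead of a per-read ascending scan
--     with a running maximum, search overlap lengths globally from the largest possible
--     one downward (with each read's cap precomputed once) and return at the first read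
--     that matches: the first match from the top is exactly the maximum, with A's
--     first-read tie-breaking."""
--     if not reads:
--         return None, 0
--     caps = [max(len(contig), len(r)) for r in reads]
--     pairs = list(zip(reads, caps))
--     top = 0
--     for c in caps:
--         top = max(top, c)
--     for i in range(top - 1, max(k, 1) - 1, -1):
--         for read, cap in pairs:
--             if i < cap and (contig.endswith(read[:i]) or contig.startswith(read[-i:])):
--                 return read, i
--     return None, 0
-- ===== Notes on version B (the rewrite author's own statement) =====
-- stated objective: alternative
-- what changed: A scans every read with an ascending inner loop over all candidate overlap lengths while keeping a running maximum; B inverts the search: it precomputes each read's overlap cap once, walks the overlap length downward from the largest possible value and returns at the first read that matches, which by construction is A's maximum with A's first-read tie-breaking, so it can stop as soon as a match is found instead of always exhausting the range.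
import Mathlib
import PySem

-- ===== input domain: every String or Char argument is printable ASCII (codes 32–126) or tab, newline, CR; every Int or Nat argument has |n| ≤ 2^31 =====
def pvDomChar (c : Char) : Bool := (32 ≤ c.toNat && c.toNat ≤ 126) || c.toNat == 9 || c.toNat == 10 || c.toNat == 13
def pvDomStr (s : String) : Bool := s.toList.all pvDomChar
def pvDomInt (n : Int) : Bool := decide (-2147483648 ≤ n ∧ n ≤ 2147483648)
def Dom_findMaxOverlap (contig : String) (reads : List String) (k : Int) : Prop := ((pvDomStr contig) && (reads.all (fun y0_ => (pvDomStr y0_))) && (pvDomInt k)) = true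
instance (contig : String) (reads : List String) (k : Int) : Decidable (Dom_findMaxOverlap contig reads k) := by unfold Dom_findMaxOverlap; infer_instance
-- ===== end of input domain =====

-- B changes the search order, not the answer: instead of A's per-read ascending scan with a
-- running maximum, B searches overlap lengths globally from the largest possible one downward
-- and returns at the first matching read (objective: alternative algorithm with early exit).

-- ===== PORT A =====
-- contig.endswith(read[:i]) or contig.startswith(read[-i:])  (shared by both ports verbatim)
def pvCond (contig read : String) (i : Int) : Bool :=
  PySem.Str.endswith contig (PySem.Str.slice read none (some i)) ||
  PySem.Str.startswith contig (PySem.Str.slice read (some (-i)) none)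

def findMaxOverlap (contig : String) (reads : List String) (k : Int) : Option String × Int :=
  reads.foldl (fun acc read =>
    let overlap : Int := max (PySem.Str.len contig) (PySem.Str.len read)
    (PySem.List.pyRange k overlap 1).foldl (fun acc2 i =>
      if pvCond contig read i then
        if i > acc2.2 then (some read, i) else acc2
      else acc2) acc) ((none : Option String), (0 : Int))

-- ===== PORT B =====
-- i < cap and (contig.endswith(read[:i]) or contig.startswith(read[-i:]))
def pvGuard (contig : String) (p : String × Int) (i : Int) : Bool :=
  decide (i < p.2) && pvCond contig p.1 i

-- the inner 'for read, cap in pairs: if …: return read, i'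
def pvScan (contig : String) (i : Int) : List (String × Int) → Option String
  | [] => none
  | p :: ps => if pvGuard contig p i then some p.1 else pvScan contig i ps

-- the 'for i in range(top - 1, max(k, 1) - 1, -1)' loop with early return
def pvSearch (contig : String) (pairs : List (String × Int)) (lo i : Int) : Option String × Int :=
  if _h : i < lo then ((none : Option String), (0 : Int))
  else match pvScan contig i pairs with
    | some r => (some r, i)
    | none => pvSearch contig pairs lo (i - 1)
termination_by (i - lo + 1).toNat
decreasing_by simp_wf; omega

def findMaxOverlap_alt (contig : String) (reads : List String) (k : Int) : Option String × Int :=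
  match reads with
  | [] => ((none : Option String), (0 : Int))
  | _ :: _ =>
    let caps := reads.map (fun r => max (PySem.Str.len contig) (PySem.Str.len r))
    let pairs := reads.zip caps
    let top := caps.foldl max 0
    pvSearch contig pairs (max k 1) (top - 1)

-- ===== PRECONDITION & SPEC =====
def Spec_findMaxOverlap (contig : String) (reads : List String) (k : Int) (out : Option String × Int) : Prop := out = findMaxOverlap_alt contig reads k
instance (contig : String) (reads : List String) (k : Int) (out : Option String × Int) : Decidable (Spec_findMaxOverlap contig reads k out) := by unfold Spec_findMaxOverlap; infer_instance

-- ===== CLAIM (what is proved, stated in full; the proofs are below) =====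
def Claim_equal_findMaxOverlap : Prop := ∀ (contig : String) (reads : List String) (k : Int), Dom_findMaxOverlap contig reads k → Spec_findMaxOverlap contig reads k (findMaxOverlap contig reads k)

-- ===== LEMMAS AND PROOFS =====

-- proof-only helpers
-- the full match test for a read (its guard with the true cap)
def pvMatchAt (contig read : String) (i : Int) : Bool :=
  decide (i < max (PySem.Str.len contig) (PySem.Str.len read)) && pvCond contig read i

-- topmost level j in [lo, i] at which `read` matches
def pvBestDown (contig read : String) (lo i : Int) : Option Int :=
  if _h : i < lo then none
  else if pvMatchAt contig read i then some i
  else pvBestDown contig read lo (i - 1)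
termination_by (i - lo + 1).toNat
decreasing_by simp_wf; omega

theorem pvBestDown_some (contig read : String) (lo i b : Int)
    (h : pvBestDown contig read lo i = some b) :
    lo ≤ b ∧ b ≤ i ∧ pvMatchAt contig read b = true := by
  induction i using pvBestDown.induct contig read lo with
  | case1 i hlt => rw [pvBestDown, dif_pos hlt] at h; simp at h
  | case2 i hlt hm =>
      rw [pvBestDown, dif_neg hlt, if_pos hm] at h
      cases h; exact ⟨by omega, by omega, hm⟩
  | case3 i hlt hm ih =>
      rw [pvBestDown, dif_neg hlt, if_neg hm] at h
      obtain ⟨h1, h2, h3⟩ := ih h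
      exact ⟨h1, by omega, h3⟩

theorem pvBestDown_shift (contig read : String) (lo lo' i : Int) (h : lo ≤ lo') :
    pvBestDown contig read lo' i =
      match pvBestDown contig read lo i with
      | some b => if lo' ≤ b then some b else none
      | none => none := by
  induction i using pvBestDown.induct contig read lo with
  | case1 i hlt =>
      conv_rhs => rw [pvBestDown]
      rw [dif_pos hlt]
      rw [pvBestDown, dif_pos (by omega : i < lo')]
  | case2 i hlt hm =>
      conv_rhs => rw [pvBestDown]
      rw [dif_neg hlt, if_pos hm]
      by_cases h' : i < lo'
      · rw [pvBestDown, dif_pos h']; simp; omega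
      · rw [pvBestDown, dif_neg h', if_pos hm]; simp; omega
  | case3 i hlt hm ih =>
      conv_rhs => rw [pvBestDown]
      rw [dif_neg hlt, if_neg hm]
      by_cases h' : i < lo'
      · rw [pvBestDown, dif_pos h']
        cases hb : pvBestDown contig read lo (i - 1) with
        | none => simp
        | some b =>
            obtain ⟨_, h2, _⟩ := pvBestDown_some contig read lo (i-1) b hb
            simp; omega
      · rw [pvBestDown, dif_neg h', if_neg hm]; exact ih

theorem pvBestDown_cap (contig read : String) (lo i h : Int) (hhi : h ≤ i)
    (hno : ∀ j, h < j → j ≤ i → pvMatchAt contig read j = false) :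
    pvBestDown contig read lo i = pvBestDown contig read lo h := by
  induction i using pvBestDown.induct contig read lo with
  | case1 i hlt =>
      conv_lhs => rw [pvBestDown]
      rw [dif_pos hlt]
      rw [pvBestDown, dif_pos (by omega : h < lo)]
  | case2 i hlt hm =>
      by_cases he : h = i
      · subst he; rfl
      · exact absurd hm (by simp [hno i (by omega) le_rfl])
  | case3 i hlt hm ih =>
      by_cases he : h = i
      · subst he; rfl
      · rw [pvBestDown, dif_neg hlt, if_neg hm]
        exact ih (by omega) (fun j hj1 hj2 => hno j hj1 (by omega))


theorem innerA (contig read : String) (kk : Int) (acc : Option String × Int) :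
    ∀ (n : Int), n ≤ max (PySem.Str.len contig) (PySem.Str.len read) →
    (PySem.List.pyRange kk n 1).foldl (fun acc2 i =>
        if pvCond contig read i then
          if i > acc2.2 then (some read, i) else acc2
        else acc2) acc
    = match pvBestDown contig read (max kk (acc.2 + 1)) (n - 1) with
      | some b => (some read, b)
      | none => acc := by
  suffices H : ∀ (m : Nat) (n : Int), (n - kk).toNat = m →
      n ≤ max (PySem.Str.len contig) (PySem.Str.len read) →
      (PySem.List.pyRange kk n 1).foldl (fun acc2 i =>
        if pvCond contig read i then
          if i > acc2.2 then (some read, i) else acc2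
        else acc2) acc
      = match pvBestDown contig read (max kk (acc.2 + 1)) (n - 1) with
        | some b => (some read, b)
        | none => acc by
    exact fun n hn => H _ n rfl hn
  intro m
  induction m with
  | zero =>
      intro n hm hn
      have hnk : n ≤ kk := by omega
      rw [PySem.List.pyRange_one_eq_nil hnk, List.foldl_nil,
        pvBestDown, dif_pos (by omega : n - 1 < max kk (acc.2 + 1))]
  | succ m ih =>
      intro n hm hn
      have hkn : kk < n := by omega
      rw [show n = (n-1)+1 by ring, PySem.List.pyRange_one_succ_right (by omega),
        List.foldl_append, List.foldl_cons, List.foldl_nil]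
      simp only [add_sub_cancel_right]
      have hpre := ih (n-1) (by omega) (by omega)
      conv_rhs => rw [pvBestDown]
      by_cases h1 : n-1 < max kk (acc.2 + 1)
      · rw [dif_pos h1]
        have hpre2 : pvBestDown contig read (max kk (acc.2 + 1)) (n - 1 - 1) = none := by
          rw [pvBestDown, dif_pos (by omega)]
        rw [hpre2] at hpre
        simp only [] at hpre ⊢
        rw [hpre]
        have hne : ¬ ((n-1) > acc.2) := by omega
        by_cases hc : pvCond contig read (n-1) = true
        · rw [if_pos hc, if_neg hne]
        · rw [if_neg hc]
      · rw [dif_neg h1]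
        have hov : n-1 < max (PySem.Str.len contig) (PySem.Str.len read) := by omega
        have hmEq : pvMatchAt contig read (n-1) = pvCond contig read (n-1) := by
          unfold pvMatchAt
          rw [decide_eq_true hov, Bool.true_and]
        rw [hmEq]
        by_cases hc : pvCond contig read (n-1) = true
        · rw [if_pos hc]
          simp only [] at hpre ⊢
          have hlt2 : ((n-1) : Int) >
              ((PySem.List.pyRange kk (n-1) 1).foldl (fun acc2 i =>
                if pvCond contig read i then
                  if i > acc2.2 then (some read, i) else acc2
                else acc2) acc).2 := by
            rw [hpre]
            cases hb : pvBestDown contig read (max kk (acc.2 + 1)) (n - 1 - 1) with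
            | none => simp only []; omega
            | some b =>
                obtain ⟨_, h2, _⟩ := pvBestDown_some _ _ _ _ _ hb
                simp only []; omega
          rw [if_pos hc, if_pos hlt2]
        · rw [if_neg hc, if_neg (by simpa using hc), hpre]

theorem pvGuard_eq (contig : String) (p : String × Int)
    (hp : p.2 = max (PySem.Str.len contig) (PySem.Str.len p.1)) (i : Int) :
    pvGuard contig p i = pvMatchAt contig p.1 i := by
  unfold pvGuard pvMatchAt; rw [hp]

theorem pvScan_append (contig : String) (i : Int) (xs : List (String × Int)) (p : String × Int) :
    pvScan contig i (xs ++ [p]) =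
      match pvScan contig i xs with
      | some r0 => some r0
      | none => if pvGuard contig p i then some p.1 else none := by
  induction xs with
  | nil => simp [pvScan]
  | cons x xs ih =>
      simp only [List.cons_append, pvScan]
      by_cases hx : pvGuard contig x i = true
      · rw [if_pos hx, if_pos hx]
      · rw [if_neg hx, if_neg hx, ih]

theorem pvSearch_nil (contig : String) (lo i : Int) :
    pvSearch contig [] lo i = (none, 0) := by
  induction i using pvSearch.induct contig [] lo with
  | case1 i hlt => rw [pvSearch, dif_pos hlt]
  | case2 i hlt r hscan => simp [pvScan] at hscan
  | case3 i hlt hscan ih => rw [pvSearch, dif_neg hlt]; simpa [pvScan] using ih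

theorem pvSearch_cases (contig : String) (xs : List (String × Int)) (lo i : Int) :
    pvSearch contig xs lo i = (none, 0) ∨
      ∃ r0 j, pvSearch contig xs lo i = (some r0, j) ∧ lo ≤ j ∧ j ≤ i := by
  induction i using pvSearch.induct contig xs lo with
  | case1 i hlt => left; rw [pvSearch, dif_pos hlt]
  | case2 i hlt r hscan =>
      right; exact ⟨r, i, by rw [pvSearch, dif_neg hlt, hscan], by omega, le_rfl⟩
  | case3 i hlt hscan ih =>
      rw [pvSearch, dif_neg hlt, hscan]
      rcases ih with h | ⟨r0, j, h1, h2, h3⟩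
      · left; exact h
      · right; exact ⟨r0, j, h1, h2, by omega⟩

theorem pvSearch_append (contig : String) (xs : List (String × Int)) (p : String × Int)
    (hp : p.2 = max (PySem.Str.len contig) (PySem.Str.len p.1)) (lo i : Int) :
    pvSearch contig (xs ++ [p]) lo i =
      match pvSearch contig xs lo i, pvBestDown contig p.1 lo i with
      | (some r0, j), some b => if j < b then (some p.1, b) else (some r0, j)
      | (some r0, j), none => (some r0, j)
      | (none, _), some b => (some p.1, b)
      | (none, _), none => (none, 0) := by
  have hge : ∀ j, pvGuard contig p j = pvMatchAt contig p.1 j := pvGuard_eq contig p hp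
  induction i using pvSearch.induct contig xs lo with
  | case1 i hlt =>
      rw [pvSearch, dif_pos hlt]
      conv_rhs => rw [pvSearch]
      rw [dif_pos hlt, pvBestDown, dif_pos hlt]
  | case2 i hlt r0 hscan =>
      conv_rhs => rw [pvSearch]
      rw [dif_neg hlt, hscan]
      rw [pvSearch, dif_neg hlt, pvScan_append, hscan]
      simp only []
      cases hb : pvBestDown contig p.1 lo i with
      | none => rfl
      | some b =>
          obtain ⟨hb1, hb2, hb3⟩ := pvBestDown_some _ _ _ _ _ hb
          by_cases hbe : b = i
          · subst hbe; simp
          · simp [show ¬(i < b) from by omega]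
  | case3 i hlt hscan ih =>
      conv_rhs => rw [pvSearch]
      rw [dif_neg hlt, hscan]
      rw [pvSearch, dif_neg hlt, pvScan_append, hscan]
      simp only [hge i]
      by_cases hmr : pvMatchAt contig p.1 i = true
      · rw [if_pos hmr]
        have hbd : pvBestDown contig p.1 lo i = some i := by
          rw [pvBestDown, dif_neg hlt, if_pos hmr]
        rw [hbd]
        rcases pvSearch_cases contig xs lo (i-1) with h | ⟨r0, j, h1, h2, h3⟩
        · rw [h]
        · rw [h1]; simp only []
          rw [if_pos (by omega)]
      · rw [if_neg hmr, ih]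
        have hbd : pvBestDown contig p.1 lo i = pvBestDown contig p.1 lo (i-1) := by
          rw [pvBestDown, dif_neg hlt,
            if_neg (by simpa using hmr)]
        rw [hbd]

def pvStepB (contig : String) (k : Int) (acc : Option String × Int) (r : String) :
    Option String × Int :=
  match pvBestDown contig r (max k 1) (max (PySem.Str.len contig) (PySem.Str.len r) - 1) with
  | some b => if acc.2 < b then (some r, b) else acc
  | none => acc

def pvInv (k : Int) (acc : Option String × Int) : Prop :=
  acc = (none, 0) ∨ ∃ r b, acc = (some r, b) ∧ max k 1 ≤ b

theorem pvStepB_eq (contig : String) (k : Int) (acc : Option String × Int) (r : String)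
    (hacc : 0 ≤ acc.2) :
    (PySem.List.pyRange k (max (PySem.Str.len contig) (PySem.Str.len r)) 1).foldl
      (fun acc2 i =>
        if pvCond contig r i then
          if i > acc2.2 then (some r, i) else acc2
        else acc2) acc
    = pvStepB contig k acc r := by
  rw [innerA contig r k acc (max (PySem.Str.len contig) (PySem.Str.len r)) le_rfl]
  rw [pvBestDown_shift contig r (max k 1) (max k (acc.2 + 1))
      (max (PySem.Str.len contig) (PySem.Str.len r) - 1) (by omega)]
  unfold pvStepB
  cases hb : pvBestDown contig r (max k 1) (max (PySem.Str.len contig) (PySem.Str.len r) - 1) with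
  | none => rfl
  | some b =>
      obtain ⟨hb1, _, _⟩ := pvBestDown_some _ _ _ _ _ hb
      simp only []
      by_cases hle : max k (acc.2 + 1) ≤ b
      · rw [if_pos hle, if_pos (by omega)]
      · rw [if_neg hle, if_neg (by omega)]

theorem pvInv_step (contig : String) (k : Int) (acc : Option String × Int) (r : String)
    (hinv : pvInv k acc) : pvInv k (pvStepB contig k acc r) := by
  unfold pvStepB
  cases hb : pvBestDown contig r (max k 1) (max (PySem.Str.len contig) (PySem.Str.len r) - 1) with
  | none => exact hinv
  | some b =>
      obtain ⟨hb1, _, _⟩ := pvBestDown_some _ _ _ _ _ hb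
      simp only []
      by_cases hlt : acc.2 < b
      · rw [if_pos hlt]; exact Or.inr ⟨r, b, rfl, hb1⟩
      · rw [if_neg hlt]; exact hinv

theorem pvInv_nonneg (k : Int) (acc : Option String × Int) (hinv : pvInv k acc) : 0 ≤ acc.2 := by
  rcases hinv with h | ⟨r, b, h, hb⟩
  · rw [h]
  · rw [h]; simp; omega

theorem outerA (contig : String) (k : Int) (reads : List String) (acc : Option String × Int)
    (hinv : pvInv k acc) :
    reads.foldl (fun acc read =>
      let overlap : Int := max (PySem.Str.len contig) (PySem.Str.len read)
      (PySem.List.pyRange k overlap 1).foldl (fun acc2 i =>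
        if pvCond contig read i then
          if i > acc2.2 then (some read, i) else acc2
        else acc2) acc) acc
    = reads.foldl (pvStepB contig k) acc := by
  induction reads generalizing acc with
  | nil => rfl
  | cons r rs ih =>
      simp only [List.foldl_cons]
      rw [pvStepB_eq contig k acc r (pvInv_nonneg k acc hinv)]
      exact ih _ (pvInv_step contig k acc r hinv)

theorem foldB_eq_search (contig : String) (k : Int) (i : Int) (xs : List (String × Int))
    (hp : ∀ p ∈ xs, p.2 = max (PySem.Str.len contig) (PySem.Str.len p.1))
    (hcap : ∀ p ∈ xs, p.2 - 1 ≤ i) :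
    (xs.map Prod.fst).foldl (pvStepB contig k) (none, 0) = pvSearch contig xs (max k 1) i := by
  induction xs using List.reverseRecOn with
  | nil => rw [pvSearch_nil]; rfl
  | append_singleton xs p ih =>
      have hpp := hp p (by simp)
      rw [List.map_append, List.foldl_append, List.map_cons, List.map_nil,
        List.foldl_cons, List.foldl_nil,
        ih (fun q hq => hp q (by simp [hq])) (fun q hq => hcap q (by simp [hq])),
        pvSearch_append contig xs p hpp]
      have hcapp := hcap p (by simp)
      have hbd : pvBestDown contig p.1 (max k 1) i
          = pvBestDown contig p.1 (max k 1)
              (max (PySem.Str.len contig) (PySem.Str.len p.1) - 1) := by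
        apply pvBestDown_cap contig p.1 (max k 1) i _ (by omega)
        intro j hj1 _
        unfold pvMatchAt
        rw [decide_eq_false (by omega), Bool.false_and]
      unfold pvStepB
      rw [← hbd]
      rcases pvSearch_cases contig xs (max k 1) i with h | ⟨r0, j, h, hj1, hj2⟩ <;> rw [h]
      · cases hb : pvBestDown contig p.1 (max k 1) i with
        | none => rfl
        | some b =>
            obtain ⟨hb1, _, _⟩ := pvBestDown_some _ _ _ _ _ hb
            simp only []
            rw [if_pos (by omega)]
      · cases hb : pvBestDown contig p.1 (max k 1) i with
        | none => rfl
        | some b => rfl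

-- unfolding B on a nonempty list
theorem alt_cons (contig : String) (r0 : String) (rs : List String) (k : Int) :
    findMaxOverlap_alt contig (r0 :: rs) k
      = pvSearch contig
          ((r0 :: rs).zip ((r0 :: rs).map
            (fun r => max (PySem.Str.len contig) (PySem.Str.len r))))
          (max k 1)
          ((((r0 :: rs).map
            (fun r => max (PySem.Str.len contig) (PySem.Str.len r))).foldl max 0) - 1) := rfl

-- ===== VERDICT (by name: the statement is the Claim_ definition above) =====
theorem findMaxOverlap_spec : Claim_equal_findMaxOverlap := by
  intro contig reads k _
  unfold Spec_findMaxOverlap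
  cases reads with
  | nil => rfl
  | cons r0 rs =>
    rw [alt_cons]
    unfold findMaxOverlap
    rw [outerA contig k (r0 :: rs) (none, 0) (Or.inl rfl)]
    have hzip : (r0 :: rs).zip ((r0 :: rs).map
          (fun r => max (PySem.Str.len contig) (PySem.Str.len r)))
        = (r0 :: rs).map
            (fun r => (r, max (PySem.Str.len contig) (PySem.Str.len r))) := by
      have h := List.zip_map' (f := fun r : String => r)
        (g := fun r => max (PySem.Str.len contig) (PySem.Str.len r)) (l := r0 :: rs)
      simpa using h
    rw [hzip]
    have hfold : (r0 :: rs).foldl (pvStepB contig k) (none, 0)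
        = (((r0 :: rs).map
            (fun r => (r, max (PySem.Str.len contig) (PySem.Str.len r)))).map
              Prod.fst).foldl (pvStepB contig k) (none, 0) := by
      rw [List.map_map,
        show (Prod.fst ∘ fun r => (r, max (PySem.Str.len contig) (PySem.Str.len r))) = id
          from rfl, List.map_id]
    rw [hfold]
    apply foldB_eq_search
    · intro q hq
      obtain ⟨r, _, rfl⟩ := List.mem_map.1 hq
      rfl
    · intro q hq
      obtain ⟨r, hr, rfl⟩ := List.mem_map.1 hq
      have h1 := (PySem.List.le_foldl_max_int ((r0 :: rs).map
        (fun r => max (PySem.Str.len contig) (PySem.Str.len r))) (fun c => c) 0).2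
        (max (PySem.Str.len contig) (PySem.Str.len r)) (by exact List.mem_map_of_mem hr)
      simp only [List.foldl_map] at h1 ⊢
      omega
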